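-- pv_equiv track=rewrite | github.com/ashwinrachhavt/alfred | apps/alfred/services/agentic_rag.py | enforce_first_person
-- ===== SOURCE A (Python) =====
-- def enforce_first_person(text: str) -> str:
--     swaps = {
--         "Ashwin has": "I have",
--         "Ashwin is": "I am",
--         "Ashwin was": "I was",
--         "Ashwin did": "I did",
--         "Ashwin led": "I led",
--         "Ashwin built": "I built",
--     }
--     for a, b in swaps.items():
--         text = text.replace(a, b)
--     return text
-- ===== SOURCE B (Python) =====
-- def enforce_first_person(text: str) -> str:
--     swaps = {
--         "Ashwin has": "I have",
--         "Ashwin is": "I am",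
--         "Ashwin was": "I was",
--         "Ashwin did": "I did",
--         "Ashwin led": "I led",
--         "Ashwin built": "I built",
--     }
--     out = []
--     i = 0
--     n = len(text)
--     while i < n:
--         for k, r in swaps.items():
--             if text.startswith(k, i):
--                 out.append(r)
--                 i += len(k)
--                 break
--         else:
--             out.append(text[i])
--             i += 1
--     return "".join(out)
-- ===== Notes on version B (the rewrite author's own statement) =====
-- stated objective: alternative
-- what changed: B makes a single left-to-right scan of the text, emitting the dict's replacement at the first key that matches at the current position and copying other characters, instead of A's six sequential full-string replace passes.
import Mathlib
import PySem

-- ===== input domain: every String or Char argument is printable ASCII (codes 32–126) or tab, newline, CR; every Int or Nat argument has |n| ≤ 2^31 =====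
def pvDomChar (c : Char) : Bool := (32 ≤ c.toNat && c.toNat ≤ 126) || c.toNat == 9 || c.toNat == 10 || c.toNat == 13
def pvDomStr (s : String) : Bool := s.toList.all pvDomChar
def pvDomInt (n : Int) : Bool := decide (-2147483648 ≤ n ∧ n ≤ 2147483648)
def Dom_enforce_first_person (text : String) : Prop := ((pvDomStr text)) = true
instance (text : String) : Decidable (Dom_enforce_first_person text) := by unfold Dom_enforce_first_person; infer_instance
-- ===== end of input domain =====

-- B changes the algorithm (one scan with first-match dispatch instead of six replace passes), same results.

-- ===== PORT A =====
def enforce_first_person (text : String) : String :=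
  let swaps : PySem.Dict String String :=
    ((((((PySem.Dict.empty).insert "Ashwin has" "I have").insert "Ashwin is" "I am").insert
        "Ashwin was" "I was").insert "Ashwin did" "I did").insert "Ashwin led" "I led").insert
        "Ashwin built" "I built"
  swaps.items.foldl (fun t ab => PySem.Str.replace t ab.1 ab.2) text

-- ===== PORT B =====
def kHas : List Char := ['A','s','h','w','i','n',' ','h','a','s']
def kIs : List Char := ['A','s','h','w','i','n',' ','i','s']
def kWas : List Char := ['A','s','h','w','i','n',' ','w','a','s']
def kDid : List Char := ['A','s','h','w','i','n',' ','d','i','d']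
def kLed : List Char := ['A','s','h','w','i','n',' ','l','e','d']
def kBuilt : List Char := ['A','s','h','w','i','n',' ','b','u','i','l','t']
def rHave : List Char := ['I',' ','h','a','v','e']
def rAm : List Char := ['I',' ','a','m']
def rWas : List Char := ['I',' ','w','a','s']
def rDid : List Char := ['I',' ','d','i','d']
def rLed : List Char := ['I',' ','l','e','d']
def rBuilt : List Char := ['I',' ','b','u','i','l','t']

def efpSwaps : List (List Char × List Char) :=
  [(kHas, rHave), (kIs, rAm), (kWas, rWas), (kDid, rDid), (kLed, rLed), (kBuilt, rBuilt)]

-- B's while loop: each iteration consumes at least one character, so the remaining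
-- length is the (structural) fuel; the inner for/break over swaps.items is List.find?.
def efpScan : Nat → List Char → List Char
  | 0, _ => []
  | _ + 1, [] => []
  | fuel + 1, c :: t =>
    match efpSwaps.find? (fun p => p.1.isPrefixOf (c :: t)) with
    | some (k, r) => r ++ efpScan fuel (t.drop (k.length - 1))
    | none => c :: efpScan fuel t

def enforce_first_person_alt (text : String) : String :=
  String.ofList (efpScan text.toList.length text.toList)

-- ===== PRECONDITION & SPEC =====
def Spec_enforce_first_person (text : String) (out : String) : Prop := out = enforce_first_person_alt text
instance (text : String) (out : String) : Decidable (Spec_enforce_first_person text out) := by unfold Spec_enforce_first_person; infer_instance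

-- ===== CLAIM (what is proved, stated in full; the proofs are below) =====
def Claim_equal_enforce_first_person : Prop := ∀ (text : String), Dom_enforce_first_person text → Spec_enforce_first_person text (enforce_first_person text)

-- ===== LEMMAS AND PROOFS =====

-- Fuel-free reading of one str.replace pass (fuel = remaining length, structural).
def rep (old new : List Char) : Nat → List Char → List Char
  | 0, _ => []
  | _ + 1, [] => []
  | fuel + 1, c :: t =>
    if old.isPrefixOf (c :: t) then new ++ rep old new fuel (t.drop (old.length - 1))
    else c :: rep old new fuel t

def repF (old new l : List Char) : List Char := rep old new l.length l

def scanF (l : List Char) : List Char := efpScan l.length l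

def passA (s : List Char) : List Char :=
  repF kBuilt rBuilt (repF kLed rLed (repF kDid rDid (repF kWas rWas (repF kIs rAm (repF kHas rHave s)))))

lemma rep_fuel (old new : List Char) :
    ∀ (f f' : Nat) (l : List Char), l.length ≤ f → l.length ≤ f' →
      rep old new f l = rep old new f' l := by
  intro f
  induction f with
  | zero =>
    intro f' l h1 _
    have : l = [] := List.length_eq_zero_iff.mp (Nat.le_zero.mp h1)
    subst this
    cases f' <;> rfl
  | succ f ih =>
    intro f' l h1 h2
    cases l with
    | nil => cases f' <;> rfl
    | cons c t =>
      cases f' with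
      | zero => simp at h2
      | succ f2 =>
        simp only [rep]
        simp only [List.length_cons] at h1 h2
        by_cases hp : old.isPrefixOf (c :: t)
        · rw [if_pos hp, if_pos hp]
          have hd : (t.drop (old.length - 1)).length ≤ t.length := by
            simp [List.length_drop]
          rw [ih f2 _ (le_trans hd (by omega)) (le_trans hd (by omega))]
        · rw [if_neg hp, if_neg hp]
          rw [ih f2 t (by omega) (by omega)]

lemma repF_nil (old new : List Char) : repF old new [] = [] := rfl

lemma repF_cons (old new : List Char) (c : Char) (t : List Char) :
    repF old new (c :: t) =
      if old.isPrefixOf (c :: t) then new ++ repF old new (t.drop (old.length - 1))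
      else c :: repF old new t := by
  show rep old new (t.length + 1) (c :: t) = _
  simp only [rep]
  by_cases hp : old.isPrefixOf (c :: t)
  · rw [if_pos hp, if_pos hp]
    rw [rep_fuel old new t.length (t.drop (old.length - 1)).length _ (by simp [List.length_drop]) le_rfl]
    rfl
  · rw [if_neg hp, if_neg hp]
    rfl

lemma scan_fuel :
    ∀ (f f' : Nat) (l : List Char), l.length ≤ f → l.length ≤ f' →
      efpScan f l = efpScan f' l := by
  intro f
  induction f with
  | zero =>
    intro f' l h1 _
    have : l = [] := List.length_eq_zero_iff.mp (Nat.le_zero.mp h1)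
    subst this
    cases f' <;> rfl
  | succ f ih =>
    intro f' l h1 h2
    cases l with
    | nil => cases f' <;> rfl
    | cons c t =>
      cases f' with
      | zero => simp at h2
      | succ f2 =>
        simp only [efpScan]
        simp only [List.length_cons] at h1 h2
        cases hF : efpSwaps.find? (fun p => p.1.isPrefixOf (c :: t)) with
        | none =>
          dsimp only
          rw [ih f2 t (by omega) (by omega)]
        | some p =>
          rcases p with ⟨k, r⟩
          dsimp only
          have hd : (t.drop (k.length - 1)).length ≤ t.length := by simp [List.length_drop]
          rw [ih f2 _ (le_trans hd (by omega)) (le_trans hd (by omega))]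

lemma scanF_cons (c : Char) (t : List Char) :
    scanF (c :: t) =
      match efpSwaps.find? (fun p => p.1.isPrefixOf (c :: t)) with
      | some (k, r) => r ++ scanF (t.drop (k.length - 1))
      | none => c :: scanF t := by
  show efpScan (t.length + 1) (c :: t) = _
  simp only [efpScan]
  cases hF : efpSwaps.find? (fun p => p.1.isPrefixOf (c :: t)) with
  | none => rfl
  | some p =>
    rcases p with ⟨k, r⟩
    dsimp only
    rw [scan_fuel t.length (t.drop (k.length - 1)).length _ (by simp [List.length_drop]) le_rfl]
    rfl

-- PySem's replace.go is repF with an accumulator.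
lemma go_eq (old new : List Char) (ho : old ≠ []) :
    ∀ (f : Nat) (l acc : List Char), l.length ≤ f →
      PySem.Chars.replace.go old new f l acc = acc.reverse ++ repF old new l := by
  intro f
  induction f with
  | zero =>
    intro l acc h1
    have : l = [] := List.length_eq_zero_iff.mp (Nat.le_zero.mp h1)
    subst this
    simp [PySem.Chars.replace.go, repF_nil]
  | succ f ih =>
    intro l acc h1
    cases l with
    | nil => simp [PySem.Chars.replace.go, repF_nil]
    | cons c t =>
      simp only [List.length_cons] at h1
      rw [PySem.Chars.replace.go]
      by_cases hp : old.isPrefixOf (c :: t)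
      · rw [if_pos hp]
        have hdrop : List.drop old.length (c :: t) = t.drop (old.length - 1) := by
          cases old with
          | nil => exact absurd rfl ho
          | cons o ot => rfl
        have hd : (t.drop (old.length - 1)).length ≤ t.length := by simp [List.length_drop]
        have hd' : (List.drop old.length (c :: t)).length ≤ f := by
          rw [hdrop]; exact le_trans hd (by omega)
        rw [ih _ (new.reverse ++ acc) hd', hdrop]
        rw [repF_cons, if_pos hp]
        simp [List.append_assoc]
      · rw [if_neg hp]
        rw [ih t (c :: acc) (by omega)]
        rw [repF_cons, if_neg hp]
        simp

lemma replace_eq_repF (s old new : List Char) (ho : old ≠ []) :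
    PySem.Chars.replace s old new = repF old new s := by
  unfold PySem.Chars.replace
  rw [if_neg (by simp [List.isEmpty_iff, ho])]
  rw [go_eq old new ho s.length s [] le_rfl]
  simp

-- If neither of two lists is a prefix of the other, appending anything to the second changes nothing.
lemma np_append {k' k : List Char} (X : List Char) (h1 : ¬ k' <+: k) (h2 : ¬ k <+: k') :
    ¬ k' <+: (k ++ X) := by
  induction k' generalizing k with
  | nil => exact absurd (List.nil_prefix) h1
  | cons a q ih =>
    cases k with
    | nil => exact absurd (List.nil_prefix) h2
    | cons b kt =>
      rw [List.cons_append, List.cons_prefix_cons]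
      rintro ⟨rfl, hpre⟩
      exact ih (k := kt) (fun h => h1 (List.cons_prefix_cons.mpr ⟨rfl, h⟩))
        (fun h => h2 (List.cons_prefix_cons.mpr ⟨rfl, h⟩)) hpre

-- A pass whose pattern cannot match at any position inside k just copies k.
lemma repF_append (k' r' k : List Char)
    (h : ∀ m, m < k.length → ¬ k' <+: k.drop m ∧ ¬ k.drop m <+: k') (X : List Char) :
    repF k' r' (k ++ X) = k ++ repF k' r' X := by
  induction k with
  | nil => simp
  | cons c kt ih =>
    have h0 := h 0 (by simp)
    simp only [List.drop_zero] at h0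
    have hnp : ¬ k' <+: ((c :: kt) ++ X) := np_append X h0.1 h0.2
    rw [List.cons_append, repF_cons, if_neg (by rw [List.isPrefixOf_iff_prefix]; rw [← List.cons_append]; exact hnp)]
    rw [ih (fun m hm => by
      have := h (m + 1) (by simpa using Nat.succ_lt_succ hm)
      simpa using this)]
    exact rfl

lemma repF_head_match (k r : List Char) (hk : k ≠ []) (u : List Char) :
    repF k r (k ++ u) = r ++ repF k r u := by
  cases k with
  | nil => exact absurd rfl hk
  | cons c kt =>
    rw [List.cons_append, repF_cons,
      if_pos (by rw [List.isPrefixOf_iff_prefix, ← List.cons_append]; exact List.prefix_append _ _)]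
    have hl : (c :: kt).length - 1 = kt.length := by simp
    rw [hl, List.drop_left]

-- Replacements start with 'I'; a prefix without 'I' of a pass's output is a prefix of its input.
lemma repF_prefix_transfer (k r : List Char) (hr : r.head? = some 'I') :
    ∀ (n : Nat) (s q : List Char), s.length ≤ n → 'I' ∉ q → q <+: repF k r s → q <+: s := by
  intro n
  induction n with
  | zero =>
    intro s q h1 _ hpre
    have : s = [] := List.length_eq_zero_iff.mp (Nat.le_zero.mp h1)
    subst this
    rw [repF_nil] at hpre
    rw [List.prefix_nil.mp hpre]
  | succ n ih =>
    intro s q h1 hq hpre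
    cases s with
    | nil =>
      rw [repF_nil] at hpre
      rw [List.prefix_nil.mp hpre]
    | cons c t =>
      simp only [List.length_cons] at h1
      rw [repF_cons] at hpre
      by_cases hp : k.isPrefixOf (c :: t)
      · rw [if_pos hp] at hpre
        cases q with
        | nil => exact List.nil_prefix
        | cons a q2 =>
          cases r with
          | nil => simp at hr
          | cons r0 r2 =>
            simp only [List.head?_cons, Option.some.injEq] at hr
            rw [List.cons_append, List.cons_prefix_cons] at hpre
            subst hr
            rw [hpre.1] at hq
            simp at hq
      · rw [if_neg hp] at hpre
        cases q with
        | nil => exact List.nil_prefix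
        | cons a q2 =>
          rw [List.cons_prefix_cons] at hpre
          exact List.cons_prefix_cons.mpr
            ⟨hpre.1, ih t q2 (by omega) (by simp at hq; exact fun h => hq.2 h) hpre.2⟩

lemma ct (k r : List Char) (hr : r.head? = some 'I') (c : Char)
    (q s : List Char) (hq : 'I' ∉ q) (h : q <+: c :: repF k r s) : q <+: c :: s := by
  cases q with
  | nil => exact List.nil_prefix
  | cons a q2 =>
    rw [List.cons_prefix_cons] at h
    exact List.cons_prefix_cons.mpr
      ⟨h.1, repF_prefix_transfer k r hr s.length s q2 le_rfl (by simp at hq; exact fun h' => hq.2 h') h.2⟩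

-- passA on a head matched by each key.
lemma passA_has (u : List Char) : passA (kHas ++ u) = rHave ++ passA u := by
  unfold passA
  rw [repF_head_match kHas rHave (by decide) u,
    repF_append kIs rAm rHave (by decide),
    repF_append kWas rWas rHave (by decide),
    repF_append kDid rDid rHave (by decide),
    repF_append kLed rLed rHave (by decide),
    repF_append kBuilt rBuilt rHave (by decide)]

lemma passA_is (u : List Char) : passA (kIs ++ u) = rAm ++ passA u := by
  unfold passA
  rw [repF_append kHas rHave kIs (by decide),
    repF_head_match kIs rAm (by decide),
    repF_append kWas rWas rAm (by decide),
    repF_append kDid rDid rAm (by decide),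
    repF_append kLed rLed rAm (by decide),
    repF_append kBuilt rBuilt rAm (by decide)]

lemma passA_was (u : List Char) : passA (kWas ++ u) = rWas ++ passA u := by
  unfold passA
  rw [repF_append kHas rHave kWas (by decide),
    repF_append kIs rAm kWas (by decide),
    repF_head_match kWas rWas (by decide),
    repF_append kDid rDid rWas (by decide),
    repF_append kLed rLed rWas (by decide),
    repF_append kBuilt rBuilt rWas (by decide)]

lemma passA_did (u : List Char) : passA (kDid ++ u) = rDid ++ passA u := by
  unfold passA
  rw [repF_append kHas rHave kDid (by decide),
    repF_append kIs rAm kDid (by decide),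
    repF_append kWas rWas kDid (by decide),
    repF_head_match kDid rDid (by decide),
    repF_append kLed rLed rDid (by decide),
    repF_append kBuilt rBuilt rDid (by decide)]

lemma passA_led (u : List Char) : passA (kLed ++ u) = rLed ++ passA u := by
  unfold passA
  rw [repF_append kHas rHave kLed (by decide),
    repF_append kIs rAm kLed (by decide),
    repF_append kWas rWas kLed (by decide),
    repF_append kDid rDid kLed (by decide),
    repF_head_match kLed rLed (by decide),
    repF_append kBuilt rBuilt rLed (by decide)]

lemma passA_built (u : List Char) : passA (kBuilt ++ u) = rBuilt ++ passA u := by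
  unfold passA
  rw [repF_append kHas rHave kBuilt (by decide),
    repF_append kIs rAm kBuilt (by decide),
    repF_append kWas rWas kBuilt (by decide),
    repF_append kDid rDid kBuilt (by decide),
    repF_append kLed rLed kBuilt (by decide),
    repF_head_match kBuilt rBuilt (by decide)]

-- passA on a head matched by no key.
lemma passA_nomatch (c : Char) (t : List Char)
    (h1 : ¬ kHas <+: c :: t) (h2 : ¬ kIs <+: c :: t) (h3 : ¬ kWas <+: c :: t)
    (h4 : ¬ kDid <+: c :: t) (h5 : ¬ kLed <+: c :: t) (h6 : ¬ kBuilt <+: c :: t) :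
    passA (c :: t) = c :: passA t := by
  have n2 : ¬ kIs <+: c :: repF kHas rHave t := fun hx =>
    h2 (ct kHas rHave (by decide) c kIs t (by decide) hx)
  have n3 : ¬ kWas <+: c :: repF kIs rAm (repF kHas rHave t) := fun hx =>
    h3 (ct kHas rHave (by decide) c kWas t (by decide)
      (ct kIs rAm (by decide) c kWas _ (by decide) hx))
  have n4 : ¬ kDid <+: c :: repF kWas rWas (repF kIs rAm (repF kHas rHave t)) := fun hx =>
    h4 (ct kHas rHave (by decide) c kDid t (by decide)
      (ct kIs rAm (by decide) c kDid _ (by decide)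
        (ct kWas rWas (by decide) c kDid _ (by decide) hx)))
  have n5 : ¬ kLed <+: c :: repF kDid rDid (repF kWas rWas (repF kIs rAm (repF kHas rHave t))) := fun hx =>
    h5 (ct kHas rHave (by decide) c kLed t (by decide)
      (ct kIs rAm (by decide) c kLed _ (by decide)
        (ct kWas rWas (by decide) c kLed _ (by decide)
          (ct kDid rDid (by decide) c kLed _ (by decide) hx))))
  have n6 : ¬ kBuilt <+: c :: repF kLed rLed (repF kDid rDid (repF kWas rWas (repF kIs rAm (repF kHas rHave t)))) := fun hx =>
    h6 (ct kHas rHave (by decide) c kBuilt t (by decide)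
      (ct kIs rAm (by decide) c kBuilt _ (by decide)
        (ct kWas rWas (by decide) c kBuilt _ (by decide)
          (ct kDid rDid (by decide) c kBuilt _ (by decide)
            (ct kLed rLed (by decide) c kBuilt _ (by decide) hx)))))
  unfold passA
  rw [repF_cons kHas rHave, if_neg (by rw [List.isPrefixOf_iff_prefix]; exact h1),
    repF_cons kIs rAm, if_neg (by rw [List.isPrefixOf_iff_prefix]; exact n2),
    repF_cons kWas rWas, if_neg (by rw [List.isPrefixOf_iff_prefix]; exact n3),
    repF_cons kDid rDid, if_neg (by rw [List.isPrefixOf_iff_prefix]; exact n4),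
    repF_cons kLed rLed, if_neg (by rw [List.isPrefixOf_iff_prefix]; exact n5),
    repF_cons kBuilt rBuilt, if_neg (by rw [List.isPrefixOf_iff_prefix]; exact n6)]

lemma main_aux : ∀ (n : Nat) (s : List Char), s.length ≤ n → passA s = scanF s := by
  intro n
  induction n with
  | zero =>
    intro s hs
    have : s = [] := List.length_eq_zero_iff.mp (Nat.le_zero.mp hs)
    subst this
    rfl
  | succ n ih =>
    intro s hs
    cases s with
    | nil => rfl
    | cons c t =>
      simp only [List.length_cons] at hs
      cases hF : efpSwaps.find? (fun p => p.1.isPrefixOf (c :: t)) with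
      | none =>
        rw [scanF_cons, hF]
        have hall := List.find?_eq_none.mp hF
        have g : ∀ p ∈ efpSwaps, ¬ p.1 <+: c :: t := fun p hp hx => by
          have := hall p hp
          rw [List.isPrefixOf_iff_prefix (l₁ := p.1) (l₂ := c :: t)] at this
          exact this hx
        rw [passA_nomatch c t (g (kHas, rHave) (by simp [efpSwaps])) (g (kIs, rAm) (by simp [efpSwaps]))
          (g (kWas, rWas) (by simp [efpSwaps])) (g (kDid, rDid) (by simp [efpSwaps]))
          (g (kLed, rLed) (by simp [efpSwaps])) (g (kBuilt, rBuilt) (by simp [efpSwaps])),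
          ih t (by omega)]
      | some p =>
        rcases p with ⟨k, r⟩
        have hmem : (k, r) ∈ efpSwaps := List.mem_of_find?_eq_some hF
        have hpre : k <+: c :: t := by
          have := List.find?_some hF
          rwa [List.isPrefixOf_iff_prefix] at this
        rw [scanF_cons, hF]
        simp only [efpSwaps, List.mem_cons, List.not_mem_nil, or_false, Prod.mk.injEq] at hmem
        rcases hpre with ⟨u, hu⟩
        have hlen := congrArg List.length hu
        simp only [List.length_append, List.length_cons] at hlen
        rcases hmem with ⟨hk, hr⟩ | ⟨hk, hr⟩ | ⟨hk, hr⟩ | ⟨hk, hr⟩ | ⟨hk, hr⟩ | ⟨hk, hr⟩ <;>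
          subst hk <;> subst hr
        · have hlenu : u.length ≤ n := by simp [kHas] at hlen; omega
          have ht : t = ['s','h','w','i','n',' ','h','a','s'] ++ u := by
            have := hu
            simp only [kHas, List.cons_append, List.cons.injEq] at this
            exact this.2.symm
          rw [← hu, passA_has u, ih u hlenu, ht]
          simp [kHas]
        · have hlenu : u.length ≤ n := by simp [kIs] at hlen; omega
          have ht : t = ['s','h','w','i','n',' ','i','s'] ++ u := by
            have := hu
            simp only [kIs, List.cons_append, List.cons.injEq] at this
            exact this.2.symm
          rw [← hu, passA_is u, ih u hlenu, ht]
          simp [kIs]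
        · have hlenu : u.length ≤ n := by simp [kWas] at hlen; omega
          have ht : t = ['s','h','w','i','n',' ','w','a','s'] ++ u := by
            have := hu
            simp only [kWas, List.cons_append, List.cons.injEq] at this
            exact this.2.symm
          rw [← hu, passA_was u, ih u hlenu, ht]
          simp [kWas]
        · have hlenu : u.length ≤ n := by simp [kDid] at hlen; omega
          have ht : t = ['s','h','w','i','n',' ','d','i','d'] ++ u := by
            have := hu
            simp only [kDid, List.cons_append, List.cons.injEq] at this
            exact this.2.symm
          rw [← hu, passA_did u, ih u hlenu, ht]
          simp [kDid]
        · have hlenu : u.length ≤ n := by simp [kLed] at hlen; omega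
          have ht : t = ['s','h','w','i','n',' ','l','e','d'] ++ u := by
            have := hu
            simp only [kLed, List.cons_append, List.cons.injEq] at this
            exact this.2.symm
          rw [← hu, passA_led u, ih u hlenu, ht]
          simp [kLed]
        · have hlenu : u.length ≤ n := by simp [kBuilt] at hlen; omega
          have ht : t = ['s','h','w','i','n',' ','b','u','i','l','t'] ++ u := by
            have := hu
            simp only [kBuilt, List.cons_append, List.cons.injEq] at this
            exact this.2.symm
          rw [← hu, passA_built u, ih u hlenu, ht]
          simp [kBuilt]

lemma a_toList (text : String) : (enforce_first_person text).toList = passA text.toList := by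
  show (PySem.Str.replace (PySem.Str.replace (PySem.Str.replace (PySem.Str.replace
    (PySem.Str.replace (PySem.Str.replace text "Ashwin has" "I have") "Ashwin is" "I am")
    "Ashwin was" "I was") "Ashwin did" "I did") "Ashwin led" "I led") "Ashwin built" "I built").toList = _
  simp only [PySem.Str.toList_replace]
  rw [show "Ashwin has".toList = kHas from by decide, show "I have".toList = rHave from by decide,
    show "Ashwin is".toList = kIs from by decide, show "I am".toList = rAm from by decide,
    show "Ashwin was".toList = kWas from by decide, show "I was".toList = rWas from by decide,
    show "Ashwin did".toList = kDid from by decide, show "I did".toList = rDid from by decide,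
    show "Ashwin led".toList = kLed from by decide, show "I led".toList = rLed from by decide,
    show "Ashwin built".toList = kBuilt from by decide, show "I built".toList = rBuilt from by decide]
  rw [replace_eq_repF _ kHas rHave (by decide), replace_eq_repF _ kIs rAm (by decide),
    replace_eq_repF _ kWas rWas (by decide), replace_eq_repF _ kDid rDid (by decide),
    replace_eq_repF _ kLed rLed (by decide), replace_eq_repF _ kBuilt rBuilt (by decide)]
  rfl

-- ===== VERDICT (by name: the statement is the Claim_ definition above) =====
theorem enforce_first_person_spec : Claim_equal_enforce_first_person := by
  intro text _
  show enforce_first_person text = enforce_first_person_alt text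
  have hA : enforce_first_person text = String.ofList (passA text.toList) := by
    rw [← a_toList text]
    simp
  rw [hA]
  show String.ofList (passA text.toList) = String.ofList (scanF text.toList)
  rw [main_aux text.toList.length text.toList le_rfl]
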